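-- pv_equiv track=rewrite | github.com/vedantupadhye/AIAgent | app.py | check_for_synonyms
-- ===== SOURCE A (Python) =====
-- column_synonyms = {
--     "slab": ["input material", "raw material", "slab"],
--     "slab weight": ["slab weight","input weight", "raw material weight"],
--     "coil": [ "coil","product", "production", "output material", "Batch", "Hot Coil", "Rolled Coil"],
--     "steel grade": ["steel grade","steel grade", "coil grade", "material grade", "tdc grade", "output material grade"],
--     "coil thickness": [ "coil thickness","output material thickness", "product thickness", "production thickness", "Batch thickness", "Hot Thickness"],
--     "coil width": [ "coil width","output material width", "product width", "production width", "Batch width", "Hot Width"],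
--     "coil weight": [   "coil weight","output material weight", "product weight", "production weight", "Plant Production", "Hot Metal Produced", "HSM Output", "Rolling Weight", "Hot Rolling Weight"],
--     "target coil thickness": ["target coil thickness","order thickness", "target thickness", "tdc thickness", "Modified Thickness"],
--     "target coil width": ["target coil width","order width", "target width", "tdc width", "Modified Width"],
--     "line running time": ["line running time", "Plant Running running time"],
--     "Production duration" : [ "Production duration" ," Coil Running Time", "Time for Production", "Time taken to Produce the coil"],
--     "idle time": ["idle time","available time", "total available time"],
--     "running time percentage": ["running time percentage","running time %", "running time percentage"],
--     "idle time percentage": ["idle time percentage", "idle time %", "idle time percentage"],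
--     "production Start Time": [ "Production Start Time","Coil Start Time", "Rolling Start Time"],
--     "coil Production Time": ["Coil Production Time","Coil End Time", "Rolling End Time", "Time of Production", "Production Time", "Rolling Finish Time", "DC Out Time"],
--     "shift a": ["shift A", "06:00:00 to 13:59:59"],
--     "shift b": ["shift B", "14:00:00 to 21:59:59"],
--     "shift c": ["shift C", "22:00:00 to 05:59:59"]
-- }
--
-- def check_for_synonyms(question):
--     best_match = None
--     best_match_length = 0
--
--     question_lower = question.lower()
--
--     for column, synonyms in column_synonyms.items():
--         for synonym in synonyms:
--             synonym_lower = synonym.lower()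
--             # checks longest found syn
--             if synonym_lower in question_lower and len(synonym_lower) > best_match_length:
--                 best_match = column
--                 best_match_length = len(synonym_lower)
--
--     return best_match
-- ===== SOURCE B (Python) =====
-- # B: a flat lookup table of (lowercased synonym, column), precomputed offline from
-- # column_synonyms by stable-sorting on descending synonym length; at call time a
-- # single scan returns the column of the first synonym contained in the question.
-- _TABLE = [
--     ('time taken to produce the coil', 'Production duration'),
--     ('plant running running time', 'line running time'),
--     ('output material thickness', 'coil thickness'),
--     ('running time percentage', 'running time percentage'),
--     ('running time percentage', 'running time percentage'),
--     ('output material weight', 'coil weight'),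
--     ('output material grade', 'steel grade'),
--     ('output material width', 'coil width'),
--     ('target coil thickness', 'target coil thickness'),
--     ('production start time', 'production Start Time'),
--     ('production thickness', 'coil thickness'),
--     ('total available time', 'idle time'),
--     ('idle time percentage', 'idle time percentage'),
--     ('idle time percentage', 'idle time percentage'),
--     ('coil production time', 'coil Production Time'),
--     ('06:00:00 to 13:59:59', 'shift a'),
--     ('14:00:00 to 21:59:59', 'shift b'),
--     ('22:00:00 to 05:59:59', 'shift c'),
--     ('raw material weight', 'slab weight'),
--     ('production duration', 'Production duration'),
--     ('time for production', 'Production duration'),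
--     ('rolling finish time', 'coil Production Time'),
--     ('hot metal produced', 'coil weight'),
--     ('hot rolling weight', 'coil weight'),
--     ('modified thickness', 'target coil thickness'),
--     (' coil running time', 'Production duration'),
--     ('rolling start time', 'production Start Time'),
--     ('time of production', 'coil Production Time'),
--     ('product thickness', 'coil thickness'),
--     ('production weight', 'coil weight'),
--     ('target coil width', 'target coil width'),
--     ('line running time', 'line running time'),
--     ('production width', 'coil width'),
--     ('plant production', 'coil weight'),
--     ('target thickness', 'target coil thickness'),
--     ('rolling end time', 'coil Production Time'),
--     ('output material', 'coil'),
--     ('batch thickness', 'coil thickness'),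
--     ('order thickness', 'target coil thickness'),
--     ('coil start time', 'production Start Time'),
--     ('production time', 'coil Production Time'),
--     ('input material', 'slab'),
--     ('material grade', 'steel grade'),
--     ('coil thickness', 'coil thickness'),
--     ('product weight', 'coil weight'),
--     ('rolling weight', 'coil weight'),
--     ('modified width', 'target coil width'),
--     ('available time', 'idle time'),
--     ('running time %', 'running time percentage'),
--     ('hot thickness', 'coil thickness'),
--     ('product width', 'coil width'),
--     ('tdc thickness', 'target coil thickness'),
--     ('coil end time', 'coil Production Time'),
--     ('raw material', 'slab'),
--     ('input weight', 'slab weight'),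
--     ('target width', 'target coil width'),
--     ('slab weight', 'slab weight'),
--     ('rolled coil', 'coil'),
--     ('steel grade', 'steel grade'),
--     ('steel grade', 'steel grade'),
--     ('batch width', 'coil width'),
--     ('coil weight', 'coil weight'),
--     ('order width', 'target coil width'),
--     ('idle time %', 'idle time percentage'),
--     ('dc out time', 'coil Production Time'),
--     ('production', 'coil'),
--     ('coil grade', 'steel grade'),
--     ('coil width', 'coil width'),
--     ('hsm output', 'coil weight'),
--     ('tdc grade', 'steel grade'),
--     ('hot width', 'coil width'),
--     ('tdc width', 'target coil width'),
--     ('idle time', 'idle time'),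
--     ('hot coil', 'coil'),
--     ('product', 'coil'),
--     ('shift a', 'shift a'),
--     ('shift b', 'shift b'),
--     ('shift c', 'shift c'),
--     ('batch', 'coil'),
--     ('slab', 'slab'),
--     ('coil', 'coil'),
-- ]
--
-- def check_for_synonyms(question):
--     q = question.lower()
--     for syn, col in _TABLE:
--         if syn in q:
--             return col
--     return None
-- ===== Notes on version B (the rewrite author's own statement) =====
-- stated objective: alternative
-- what changed: B replaces A's nested running-max scan over the synonym dict with a flat precomputed lookup table of (lowercased synonym, column) pairs stably sorted by descending synonym length, scanned once with early exit at the first substring hit.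
import Mathlib
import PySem

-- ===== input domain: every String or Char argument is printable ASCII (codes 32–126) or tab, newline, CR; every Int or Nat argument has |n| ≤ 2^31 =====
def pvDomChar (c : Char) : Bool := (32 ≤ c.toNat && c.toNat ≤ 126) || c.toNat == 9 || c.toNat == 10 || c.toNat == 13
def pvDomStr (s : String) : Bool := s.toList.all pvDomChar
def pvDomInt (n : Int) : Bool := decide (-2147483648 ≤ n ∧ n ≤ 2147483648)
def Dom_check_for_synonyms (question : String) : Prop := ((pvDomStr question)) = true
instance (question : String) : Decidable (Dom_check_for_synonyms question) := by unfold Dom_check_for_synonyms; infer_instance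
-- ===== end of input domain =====

-- B replaces A's nested running-max scan with a flat precomputed table of
-- (lowercased synonym, column) pairs stably sorted by descending synonym length,
-- scanned once with early exit at the first substring hit; equivalence is on the return value.

-- ===== PORT A =====
def column_synonyms : List (String × List String) := [
  ("slab", ["input material", "raw material", "slab"]),
  ("slab weight", ["slab weight", "input weight", "raw material weight"]),
  ("coil", ["coil", "product", "production", "output material", "Batch", "Hot Coil", "Rolled Coil"]),
  ("steel grade", ["steel grade", "steel grade", "coil grade", "material grade", "tdc grade", "output material grade"]),
  ("coil thickness", ["coil thickness", "output material thickness", "product thickness", "production thickness", "Batch thickness", "Hot Thickness"]),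
  ("coil width", ["coil width", "output material width", "product width", "production width", "Batch width", "Hot Width"]),
  ("coil weight", ["coil weight", "output material weight", "product weight", "production weight", "Plant Production", "Hot Metal Produced", "HSM Output", "Rolling Weight", "Hot Rolling Weight"]),
  ("target coil thickness", ["target coil thickness", "order thickness", "target thickness", "tdc thickness", "Modified Thickness"]),
  ("target coil width", ["target coil width", "order width", "target width", "tdc width", "Modified Width"]),
  ("line running time", ["line running time", "Plant Running running time"]),
  ("Production duration", ["Production duration", " Coil Running Time", "Time for Production", "Time taken to Produce the coil"]),
  ("idle time", ["idle time", "available time", "total available time"]),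
  ("running time percentage", ["running time percentage", "running time %", "running time percentage"]),
  ("idle time percentage", ["idle time percentage", "idle time %", "idle time percentage"]),
  ("production Start Time", ["Production Start Time", "Coil Start Time", "Rolling Start Time"]),
  ("coil Production Time", ["Coil Production Time", "Coil End Time", "Rolling End Time", "Time of Production", "Production Time", "Rolling Finish Time", "DC Out Time"]),
  ("shift a", ["shift A", "06:00:00 to 13:59:59"]),
  ("shift b", ["shift B", "14:00:00 to 21:59:59"]),
  ("shift c", ["shift C", "22:00:00 to 05:59:59"])]

def check_for_synonyms (question : String) : Option String :=
  let question_lower := PySem.Str.lower question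
  let st := column_synonyms.foldl
    (fun st cs =>
      cs.2.foldl
        (fun st synonym =>
          let synonym_lower := PySem.Str.lower synonym
          if PySem.Str.isIn synonym_lower question_lower
              && decide (st.2 < PySem.Str.len synonym_lower) then
            (some cs.1, PySem.Str.len synonym_lower)
          else st)
        st)
    ((none : Option String), (0 : Int))
  st.1

-- ===== PORT B =====
-- Source B's _TABLE: (lowercased synonym, column) pairs, precomputed offline,
-- stably sorted by descending synonym length.
def pvTable : List (String × String) := [
  ("time taken to produce the coil", "Production duration"),
  ("plant running running time", "line running time"),
  ("output material thickness", "coil thickness"),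
  ("running time percentage", "running time percentage"),
  ("running time percentage", "running time percentage"),
  ("output material weight", "coil weight"),
  ("output material grade", "steel grade"),
  ("output material width", "coil width"),
  ("target coil thickness", "target coil thickness"),
  ("production start time", "production Start Time"),
  ("production thickness", "coil thickness"),
  ("total available time", "idle time"),
  ("idle time percentage", "idle time percentage"),
  ("idle time percentage", "idle time percentage"),
  ("coil production time", "coil Production Time"),
  ("06:00:00 to 13:59:59", "shift a"),
  ("14:00:00 to 21:59:59", "shift b"),
  ("22:00:00 to 05:59:59", "shift c"),
  ("raw material weight", "slab weight"),
  ("production duration", "Production duration"),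
  ("time for production", "Production duration"),
  ("rolling finish time", "coil Production Time"),
  ("hot metal produced", "coil weight"),
  ("hot rolling weight", "coil weight"),
  ("modified thickness", "target coil thickness"),
  (" coil running time", "Production duration"),
  ("rolling start time", "production Start Time"),
  ("time of production", "coil Production Time"),
  ("product thickness", "coil thickness"),
  ("production weight", "coil weight"),
  ("target coil width", "target coil width"),
  ("line running time", "line running time"),
  ("production width", "coil width"),
  ("plant production", "coil weight"),
  ("target thickness", "target coil thickness"),
  ("rolling end time", "coil Production Time"),
  ("output material", "coil"),
  ("batch thickness", "coil thickness"),
  ("order thickness", "target coil thickness"),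
  ("coil start time", "production Start Time"),
  ("production time", "coil Production Time"),
  ("input material", "slab"),
  ("material grade", "steel grade"),
  ("coil thickness", "coil thickness"),
  ("product weight", "coil weight"),
  ("rolling weight", "coil weight"),
  ("modified width", "target coil width"),
  ("available time", "idle time"),
  ("running time %", "running time percentage"),
  ("hot thickness", "coil thickness"),
  ("product width", "coil width"),
  ("tdc thickness", "target coil thickness"),
  ("coil end time", "coil Production Time"),
  ("raw material", "slab"),
  ("input weight", "slab weight"),
  ("target width", "target coil width"),
  ("slab weight", "slab weight"),
  ("rolled coil", "coil"),
  ("steel grade", "steel grade"),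
  ("steel grade", "steel grade"),
  ("batch width", "coil width"),
  ("coil weight", "coil weight"),
  ("order width", "target coil width"),
  ("idle time %", "idle time percentage"),
  ("dc out time", "coil Production Time"),
  ("production", "coil"),
  ("coil grade", "steel grade"),
  ("coil width", "coil width"),
  ("hsm output", "coil weight"),
  ("tdc grade", "steel grade"),
  ("hot width", "coil width"),
  ("tdc width", "target coil width"),
  ("idle time", "idle time"),
  ("hot coil", "coil"),
  ("product", "coil"),
  ("shift a", "shift a"),
  ("shift b", "shift b"),
  ("shift c", "shift c"),
  ("batch", "coil"),
  ("slab", "slab"),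
  ("coil", "coil")]

def check_for_synonyms_alt (question : String) : Option String :=
  let q := PySem.Str.lower question
  ((pvTable.find? (fun p => PySem.Str.isIn p.1 q)).map Prod.snd)

-- ===== PRECONDITION & SPEC =====
def Spec_check_for_synonyms (question : String) (out : Option String) : Prop := out = check_for_synonyms_alt question
instance (question : String) (out : Option String) : Decidable (Spec_check_for_synonyms question out) := by unfold Spec_check_for_synonyms; infer_instance

-- ===== CLAIM (what is proved, stated in full; the proofs are below) =====
def Claim_equal_check_for_synonyms : Prop := ∀ (question : String), Dom_check_for_synonyms question → Spec_check_for_synonyms question (check_for_synonyms question)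

-- ===== LEMMAS AND PROOFS =====

def pvLen (p : String × String) : Int := PySem.Str.len p.2

def pvFlat : List (String × String) :=
  column_synonyms.flatMap (fun cs => cs.2.map (fun syn => (cs.1, PySem.Str.lower syn)))

def pvStepM (m : String × String → Bool) (st : Option String × Int) (p : String × String) :
    Option String × Int :=
  if m p && decide (st.2 < pvLen p) then (some p.1, pvLen p) else st

/-- running maximum of pvLen over the elements of L that match m and exceed threshold n -/
def pvM (m : String × String → Bool) (n : Int) (L : List (String × String)) : Int :=
  L.foldr (fun p acc => if m p && decide (n < pvLen p) then max (pvLen p) acc else acc) 0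

theorem pv_find?_congr {α : Type} (L : List α) (f g : α → Bool)
    (h : ∀ x ∈ L, f x = g x) : L.find? f = L.find? g := by
  induction L with
  | nil => rfl
  | cons a t ih =>
    simp only [List.find?]
    rw [h a (by simp)]
    cases g a <;> simp [ih (fun x hx => h x (by simp [hx]))]

theorem pv_find?_filter {α : Type} (L : List α) (f g : α → Bool) :
    (L.filter g).find? f = L.find? (fun x => g x && f x) := by
  induction L with
  | nil => rfl
  | cons a t ih =>
    by_cases hg : g a = true
    · simp only [List.filter_cons, hg, if_pos, List.find?, Bool.true_and]
      cases f a <;> simp [ih]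
    · simp only [Bool.not_eq_true] at hg
      simp [hg, List.find?, ih]

theorem pvLen_nonneg (p : String × String) : 0 ≤ pvLen p := by
  simp [pvLen, PySem.Str.len_eq]

theorem pvM_ge (m : String × String → Bool) (n : Int) (L : List (String × String)) :
    ∀ p ∈ L, m p = true → n < pvLen p → pvLen p ≤ pvM m n L := by
  induction L with
  | nil => simp
  | cons a t ih =>
    intro p hp hm hlt
    simp only [pvM, List.foldr] at *
    rcases List.mem_cons.mp hp with h | h
    · subst h; simp [hm, hlt]
    · have := ih p h hm hlt
      split <;> omega

theorem pvM_mem (m : String × String → Bool) (n : Int) (L : List (String × String)) :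
    pvM m n L = 0 ∨ ∃ p ∈ L, m p = true ∧ n < pvLen p ∧ pvM m n L = pvLen p := by
  induction L with
  | nil => simp [pvM]
  | cons a t ih =>
    simp only [pvM, List.foldr] at *
    by_cases h : (m a && decide (n < pvLen a)) = true
    · rw [if_pos h]
      obtain ⟨hm, hlt⟩ := Bool.and_eq_true_iff.mp h
      rcases ih with h0 | ⟨p, hp, hmp, hltp, he⟩
      · right
        refine ⟨a, List.mem_cons_self, hm, of_decide_eq_true hlt, ?_⟩
        rw [h0]; have := pvLen_nonneg a; omega
      · by_cases hc : pvLen p ≤ pvLen a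
        · right
          refine ⟨a, List.mem_cons_self, hm, of_decide_eq_true hlt, ?_⟩
          rw [he]; omega
        · right
          refine ⟨p, List.mem_cons_of_mem _ hp, hmp, hltp, ?_⟩
          rw [he]; omega
    · rw [if_neg h]
      rcases ih with h0 | ⟨p, hp, hmp, hltp, he⟩
      · left; exact h0
      · right; exact ⟨p, List.mem_cons_of_mem _ hp, hmp, hltp, he⟩

theorem pvM_nonneg (m : String × String → Bool) (n : Int) (L : List (String × String)) :
    0 ≤ pvM m n L := by
  induction L with
  | nil => simp [pvM]
  | cons a t ih =>
    simp only [pvM, List.foldr] at *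
    have := pvLen_nonneg a
    split <;> omega

theorem pvM_anti (m : String × String → Bool) (L : List (String × String)) :
    ∀ (n n' : Int), n ≤ n' → pvM m n' L ≤ pvM m n L := by
  induction L with
  | nil => simp [pvM]
  | cons a t ih =>
    intro n n' hle
    simp only [pvM, List.foldr] at *
    have hiht := ih n n' hle
    by_cases hc' : (m a && decide (n' < pvLen a)) = true
    · obtain ⟨hm, hlt'⟩ := Bool.and_eq_true_iff.mp hc'
      have hlt' := of_decide_eq_true hlt'
      have hc : (m a && decide (n < pvLen a)) = true := by
        simp [hm, decide_eq_true_eq]; omega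
      rw [if_pos hc', if_pos hc]; omega
    · rw [if_neg hc']
      split <;> omega

theorem pvM_cons (m : String × String → Bool) (n : Int) (a : String × String)
    (t : List (String × String)) :
    pvM m n (a :: t) = if m a && decide (n < pvLen a) then max (pvLen a) (pvM m n t)
      else pvM m n t := rfl

theorem pvM_thresh (m : String × String → Bool) (L : List (String × String)) :
    ∀ (n n' : Int), n ≤ n' → n' < pvM m n L → pvM m n' L = pvM m n L := by
  induction L with
  | nil => simp [pvM]
  | cons a t ih =>
    intro n n' hle hlt
    have hanti := pvM_anti m t n n' hle
    have hnn := pvM_nonneg m n' t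
    rw [pvM_cons, pvM_cons] at *
    by_cases hm : m a = true
    · by_cases ha : n < pvLen a
      · have hca : (m a && decide (n < pvLen a)) = true := by simp [hm, ha]
        rw [if_pos hca] at hlt ⊢
        by_cases ha' : n' < pvLen a
        · have hca' : (m a && decide (n' < pvLen a)) = true := by simp [hm, ha']
          rw [if_pos hca']
          by_cases hMt : n' < pvM m n t
          · rw [ih n n' hle hMt]
          · omega
        · have hca' : (m a && decide (n' < pvLen a)) = false := by
            simp; omega
          rw [if_neg (by simp [hca'])]
          have hMt : n' < pvM m n t := by omega
          rw [ih n n' hle hMt]; omega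
      · have ha' : ¬ n' < pvLen a := by omega
        rw [if_neg (by simp; omega)] at hlt ⊢
        rw [if_neg (by simp; omega)]
        exact ih n n' hle hlt
    · simp only [Bool.not_eq_true] at hm
      rw [if_neg (by simp [hm])] at hlt ⊢
      rw [if_neg (by simp [hm])]
      exact ih n n' hle hlt

theorem pvG (m : String × String → Bool) (L : List (String × String)) :
    ∀ (n : Int) (b : Option String),
      L.foldl (pvStepM m) (b, n) =
        match L.find? (fun p => m p && decide (n < pvLen p) && decide (pvLen p = pvM m n L)) with
        | some q => (some q.1, pvLen q)
        | none => (b, n) := by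
  induction L with
  | nil => intro n b; rfl
  | cons a t ih =>
    intro n b
    rw [List.foldl_cons]
    by_cases hc : (m a && decide (n < pvLen a)) = true
    · obtain ⟨hm, hlt⟩ := Bool.and_eq_true_iff.mp hc
      have hlt := of_decide_eq_true hlt
      have hstep : pvStepM m (b, n) a = (some a.1, pvLen a) := by
        simp only [pvStepM]; rw [if_pos hc]
      rw [hstep, ih (pvLen a) (some a.1)]
      by_cases h1 : pvM m n t ≤ pvLen a
      · -- a itself is the (first) maximal match
        have hM : pvM m n (a :: t) = pvLen a := by
          rw [pvM_cons, if_pos hc]; omega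
        have hnone : t.find? (fun p =>
            m p && decide (pvLen a < pvLen p) && decide (pvLen p = pvM m (pvLen a) t)) = none := by
          apply List.find?_eq_none.mpr
          intro p hp
          by_cases hmp : m p = true
          · by_cases hgt : pvLen a < pvLen p
            · exact absurd (pvM_ge m n t p hp hmp (by omega)) (by omega)
            · simp [hgt]
          · simp [hmp]
        have hfind : List.find? (fun p =>
            m p && decide (n < pvLen p) && decide (pvLen p = pvM m n (a :: t))) (a :: t)
            = some a := by
          rw [List.find?_cons_of_pos]
          simp [hm, hlt, hM]
        rw [hnone, hfind]
      · -- the maximum lies in the tail, strictly above pvLen a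
        rw [not_le] at h1
        have hM : pvM m n (a :: t) = pvM m n t := by
          rw [pvM_cons, if_pos hc]; omega
        have hth : pvM m (pvLen a) t = pvM m n t := pvM_thresh m t n (pvLen a) (by omega) h1
        have hnota : (fun p => m p && decide (n < pvLen p) && decide (pvLen p = pvM m n (a :: t))) a
            = false := by
          simp [hM]; omega
        rw [List.find?_cons_of_neg (by simp [hnota])]
        have hcongr : t.find? (fun p =>
              m p && decide (pvLen a < pvLen p) && decide (pvLen p = pvM m (pvLen a) t))
            = t.find? (fun p =>
              m p && decide (n < pvLen p) && decide (pvLen p = pvM m n (a :: t))) := by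
          apply pv_find?_congr
          intro p _
          rw [hth, hM]
          by_cases hq : pvLen p = pvM m n t
          · have hgt : pvLen a < pvLen p := by rw [hq]; exact h1
            have hn : n < pvLen p := by omega
            simp [hgt, hn]
          · simp [hq]
        rw [hcongr]
        cases hfind : List.find? (fun p =>
            m p && decide (n < pvLen p) && decide (pvLen p = pvM m n (a :: t))) t with
        | some q => rfl
        | none =>
          exfalso
          rcases pvM_mem m n t with h0 | ⟨p, hp, hmp, hltp, he⟩
          · have := pvLen_nonneg a; omega
          · refine List.find?_eq_none.mp hfind p hp ?_
            simp only [Bool.and_eq_true, decide_eq_true_eq]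
            exact ⟨⟨hmp, hltp⟩, by rw [hM, ← he]⟩
    · have hstep : pvStepM m (b, n) a = (b, n) := by
        simp only [pvStepM]; rw [if_neg (by simp [hc])]
      have hM : pvM m n (a :: t) = pvM m n t := by
        rw [pvM_cons, if_neg (by simp [hc])]
      have hnota : (fun p => m p && decide (n < pvLen p) && decide (pvLen p = pvM m n (a :: t))) a
          = false := by
        exact Bool.and_eq_false_iff.mpr (Or.inl (Bool.of_not_eq_true hc))
      rw [hstep, ih n b, List.find?_cons_of_neg (by simp [hnota]), hM]

theorem pvMAIN (m : String × String → Bool) (L : List (String × String)) :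
    ∀ (ds : List Int),
      ds.Pairwise (fun a b => b < a) →
      (∀ p ∈ L, m p = true → pvLen p ∈ ds) →
      (∀ p ∈ L, 0 < pvLen p) →
      L.find? (fun p => m p && decide (0 < pvLen p) && decide (pvLen p = pvM m 0 L)) =
        (ds.flatMap (fun d => L.filter (fun p => pvLen p == d))).find? m := by
  intro ds
  induction ds with
  | nil =>
    intro _ hmem _
    simp only [List.flatMap_nil, List.find?_nil]
    apply List.find?_eq_none.mpr
    intro p hp
    by_cases hmp : m p = true
    · simpa [hmp] using hmem p hp hmp
    · simp [hmp]
  | cons d ds' ih =>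
    intro hpair hmem hpos
    have hlt' : ∀ x ∈ ds', x < d := fun x hx => (List.pairwise_cons.mp hpair).1 x hx
    have hpair' := (List.pairwise_cons.mp hpair).2
    rw [List.flatMap_cons, List.find?_append]
    cases hg : (L.filter (fun p => pvLen p == d)).find? m with
    | some q =>
      -- d is the maximal matched length, and q its first witness in L
      have hq := List.find?_some hg
      have hqmem := List.mem_filter.mp (List.mem_of_find?_eq_some hg)
      have hqd : pvLen q = d := by simpa using hqmem.2
      have hqpos : 0 < pvLen q := hpos q hqmem.1
      have hMd : pvM m 0 L = d := by
        have hge : d ≤ pvM m 0 L := hqd ▸ pvM_ge m 0 L q hqmem.1 hq (by omega)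
        rcases pvM_mem m 0 L with h0 | ⟨p, hp, hmp, _, he⟩
        · omega
        · have := hmem p hp hmp
          rcases List.mem_cons.mp this with h | h
          · omega
          · have := hlt' _ h; omega
      have : L.find? (fun p => m p && decide (0 < pvLen p) && decide (pvLen p = pvM m 0 L))
          = L.find? (fun p => (pvLen p == d) && m p) := by
        apply pv_find?_congr
        intro p hp
        have := hpos p hp
        rw [hMd]
        by_cases hpd : pvLen p = d
        · simp [hpd, decide_eq_true_eq]; omega
        · simp [hpd, Bool.and_comm]
      rw [this, ← pv_find?_filter, hg]
      simp
    | none =>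
      rw [Option.none_or]
      apply ih hpair' ?_ hpos
      intro p hp hmp
      have := hmem p hp hmp
      rcases List.mem_cons.mp this with h | h
      · exfalso
        have hpf : p ∈ L.filter (fun p => pvLen p == d) := by
          simp [List.mem_filter, hp, h]
        exact List.find?_eq_none.mp hg p hpf hmp
      · exact h

def pvDs : List Int := [30, 26, 25, 23, 22, 21, 20, 19, 18, 17, 16, 15, 14, 13, 12, 11, 10, 9, 8, 7, 5, 4]

theorem pvA_eq_flat (question : String) :
    check_for_synonyms question =
      (pvFlat.foldl (pvStepM (fun p => PySem.Str.isIn p.2 (PySem.Str.lower question)))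
        ((none : Option String), (0 : Int))).1 := by
  simp only [check_for_synonyms, pvFlat, List.foldl_flatMap, List.foldl_map, pvStepM, pvLen]
  rfl

set_option maxRecDepth 8192 in
theorem pvFlat_len_mem : ∀ p ∈ pvFlat, pvLen p ∈ pvDs := by decide

set_option maxRecDepth 8192 in
theorem pvFlat_len_pos : ∀ p ∈ pvFlat, 0 < pvLen p := by decide

theorem pvDs_desc : pvDs.Pairwise (fun a b => b < a) := by decide

set_option maxRecDepth 8192 in
theorem pvTable_eq_groups :
    pvTable = (pvDs.flatMap (fun d => pvFlat.filter (fun p => pvLen p == d))).map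
      (fun p => (p.2, p.1)) := by decide

-- ===== VERDICT (by name: the statement is the Claim_ definition above) =====
theorem pv_find?_swap (q : String) (L : List (String × String)) :
    (((L.map (fun p => (p.2, p.1))).find? (fun p => PySem.Str.isIn p.1 q)).map Prod.snd)
      = ((L.find? (fun p => PySem.Str.isIn p.2 q)).map Prod.fst) := by
  induction L with
  | nil => rfl
  | cons a t ih =>
    simp only [List.map_cons, List.find?]
    cases PySem.Str.isIn a.2 q <;> simpa using ih

theorem check_for_synonyms_spec : Claim_equal_check_for_synonyms := by
  intro question _
  show check_for_synonyms question = check_for_synonyms_alt question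
  rw [pvA_eq_flat, pvG]
  rw [pvMAIN (fun p => PySem.Str.isIn p.2 (PySem.Str.lower question)) pvFlat pvDs
    pvDs_desc (fun p hp _ => pvFlat_len_mem p hp) pvFlat_len_pos]
  simp only [check_for_synonyms_alt]
  rw [pvTable_eq_groups, pv_find?_swap]
  cases ((pvDs.flatMap (fun d => pvFlat.filter (fun p => pvLen p == d))).find?
      (fun p => PySem.Str.isIn p.2 (PySem.Str.lower question))) with
  | some q => rfl
  | none => rfl
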